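-- pv_equiv track=rewrite | github.com/iforvard/2048 | 2048_base_console_ver.py | line_shift
-- ===== SOURCE A (Python) =====
-- def line_shift(line):
--     new_row = []
--     for num_line in line:
--         if num_line != 0:
--             if len(new_row) > 0:
--                 if new_row[-1][1] == 0:
--                     if new_row[-1][0] == num_line:
--                         new_row[-1] = [num_line * 2, 1]
--                     else:
--                         new_row.append([num_line, 0])
--                 else:
--                     new_row.append([num_line, 0])
--
--             else:
--                 new_row.append([num_line, 0])
--
--     # convert in stack
--     stack_row = []
--     for nun in new_row:
--         if nun[0] != 0:
--             stack_row.append(nun[0])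
--     size = 4 - len(stack_row)
--     for num_line in range(size):
--         stack_row.append(0)
--     return stack_row
-- ===== SOURCE B (Python) =====
-- def line_shift(line):
--     tiles = [x for x in line if x != 0]
--     merged = []
--     i = 0
--     while i < len(tiles):
--         if i + 1 < len(tiles) and tiles[i + 1] == tiles[i]:
--             merged.append(tiles[i] * 2)
--             i += 2
--         else:
--             merged.append(tiles[i])
--             i += 1
--     size = 4 - len(merged)
--     for _ in range(size):
--         merged.append(0)
--     return merged
-- ===== Notes on version B (the rewrite author's own statement) =====
-- stated objective: simpler
-- what changed: B drops A's [value, merged-flag] pair representation and last-element mutation: it filters out zeros once, merges with a plain index loop that looks ahead one tile and skips two after a merge, then pads to length 4.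
import Mathlib
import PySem

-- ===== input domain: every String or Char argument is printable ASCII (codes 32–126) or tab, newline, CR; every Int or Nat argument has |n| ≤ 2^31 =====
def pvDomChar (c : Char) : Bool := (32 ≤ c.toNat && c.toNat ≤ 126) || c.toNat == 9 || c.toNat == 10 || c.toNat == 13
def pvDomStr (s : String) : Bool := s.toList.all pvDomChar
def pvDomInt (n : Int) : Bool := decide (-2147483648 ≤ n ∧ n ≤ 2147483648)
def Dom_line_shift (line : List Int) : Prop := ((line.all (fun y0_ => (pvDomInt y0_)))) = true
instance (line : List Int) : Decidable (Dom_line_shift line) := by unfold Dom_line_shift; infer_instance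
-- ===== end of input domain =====

-- B is simpler: it drops A's [value, merged-flag] pair representation, filtering zeros once
-- and merging with a one-tile-lookahead loop, then pads to length 4.  Same asymptotic cost.

-- ===== PORT A =====
-- one iteration of A's first loop (body of `for num_line in line`)
def pvStep (new_row : List (Int × Int)) (num_line : Int) : List (Int × Int) :=
  if num_line ≠ 0 then
    if 0 < new_row.length then
      match new_row.getLast? with              -- new_row[-1], list known nonempty
      | some last =>
        if last.2 = 0 then
          if last.1 = num_line then new_row.dropLast ++ [(num_line * 2, 1)]
          else new_row ++ [(num_line, 0)]
        else new_row ++ [(num_line, 0)]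
      | none => new_row ++ [(num_line, 0)]     -- unreachable (length > 0)
    else new_row ++ [(num_line, 0)]
  else new_row

def line_shift (line : List Int) : List Int :=
  let new_row := line.foldl pvStep ([] : List (Int × Int))
  let stack_row := new_row.foldl (fun s nun => if nun.1 ≠ 0 then s ++ [nun.1] else s) ([] : List Int)
  let size : Int := 4 - (stack_row.length : Int)
  (PySem.List.pyRange 0 size 1).foldl (fun s _ => s ++ [(0 : Int)]) stack_row

-- ===== PORT B =====
def pvMerge : List Int → List Int
  | [] => []
  | [x] => [x]
  | x :: y :: r => if y = x then x * 2 :: pvMerge r else x :: pvMerge (y :: r)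

def line_shift_alt (line : List Int) : List Int :=
  let tiles := line.filter (fun x => x ≠ 0)
  let merged := pvMerge tiles
  merged ++ List.replicate (4 - (merged.length : Int)).toNat 0

-- ===== PRECONDITION & SPEC =====
def Spec_line_shift (line : List Int) (out : List Int) : Prop := out = line_shift_alt line
instance (line : List Int) (out : List Int) : Decidable (Spec_line_shift line out) := by unfold Spec_line_shift; infer_instance

-- ===== CLAIM (what is proved, stated in full; the proofs are below) =====
def Claim_equal_line_shift : Prop := ∀ (line : List Int), Dom_line_shift line → Spec_line_shift line (line_shift line)

-- ===== LEMMAS AND PROOFS =====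

-- A's flagged pair list, mirroring pvMerge's recursion
def pvBuild : List Int → List (Int × Int)
  | [] => []
  | [x] => [(x, 0)]
  | x :: y :: r => if y = x then (x * 2, 1) :: pvBuild r else (x, 0) :: pvBuild (y :: r)

theorem pvStep_zero (acc : List (Int × Int)) : pvStep acc 0 = acc := by
  simp [pvStep]

-- A's first loop skips zeros, so it equals the same loop over the filtered line
theorem foldl_pvStep_filter (l : List Int) : ∀ acc,
    l.foldl pvStep acc = (l.filter (fun x => x ≠ 0)).foldl pvStep acc := by
  induction l with
  | nil => intro acc; rfl
  | cons x r ih =>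
    intro acc
    by_cases hx : x = 0
    · subst hx; simp [pvStep_zero, ih]
    · simp [hx, ih]

-- when the last pair cannot merge with x, the step is a plain append
theorem pvStep_append (acc : List (Int × Int)) (x : Int) (hx : x ≠ 0)
    (hs : ∀ p, acc.getLast? = some p → p.2 ≠ 0 ∨ p.1 ≠ x) :
    pvStep acc x = acc ++ [(x, 0)] := by
  unfold pvStep
  rcases h : acc.getLast? with _ | p
  · have : acc = [] := List.getLast?_eq_none_iff.mp h
    subst this; simp [hx]
  · have hne : acc ≠ [] := by
      intro he; subst he; simp at h
    have hlen : 0 < acc.length := List.length_pos_iff.mpr hne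
    rcases hs p h with h2 | h1
    · simp [hx, hlen, h2]
    · simp [hx, hlen, h1]

-- main invariant: from a state whose last pair cannot absorb the next tile,
-- A's loop appends exactly pvBuild of the remaining (all-nonzero) tiles
theorem foldl_pvBuild (ts : List Int) : ∀ acc, (∀ x ∈ ts, x ≠ 0) →
    (∀ t, ts.head? = some t → ∀ p, acc.getLast? = some p → p.2 ≠ 0 ∨ p.1 ≠ t) →
    ts.foldl pvStep acc = acc ++ pvBuild ts := by
  induction ts using pvBuild.induct with
  | case1 => intro acc _ _; simp [pvBuild]
  | case2 x =>
    intro acc hnz hs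
    have hx : x ≠ 0 := hnz x (by simp)
    simp only [List.foldl_cons, List.foldl_nil, pvBuild]
    rw [pvStep_append acc x hx (hs x rfl)]
  | case3 x r ih =>
    intro acc hnz hs
    have hx : x ≠ 0 := hnz x (by simp)
    simp only [List.foldl_cons]
    rw [pvStep_append acc x hx (hs x rfl)]
    have hstep2 : pvStep (acc ++ [(x, 0)]) x = acc ++ [(x * 2, 1)] := by
      unfold pvStep
      simp [hx]
    rw [hstep2]
    rw [ih (acc ++ [(x * 2, 1)]) (fun z hz => hnz z (by simp [hz]))
      (by intro t _ p hp; simp at hp; left; intro h; rw [← hp] at h; simp at h)]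
    simp [pvBuild]
  | case4 x y r hne ih =>
    intro acc hnz hs
    have hx : x ≠ 0 := hnz x (by simp)
    simp only [List.foldl_cons]
    rw [pvStep_append acc x hx (hs x rfl)]
    have : (y :: r).foldl pvStep (acc ++ [(x, 0)]) = (acc ++ [(x, 0)]) ++ pvBuild (y :: r) := by
      apply ih
      · exact fun z hz => hnz z (by simp [hz])
      · intro t ht p hp
        simp at ht
        simp at hp
        right
        intro h
        rw [← hp] at h
        simp at h
        omega
    simp only [List.foldl_cons] at this
    rw [this]
    simp [pvBuild, hne]

-- A's second loop over pvBuild ts collects exactly pvMerge ts (all values nonzero)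
theorem foldl_stack (ts : List Int) : (∀ x ∈ ts, x ≠ 0) → ∀ s,
    (pvBuild ts).foldl (fun s nun => if nun.1 ≠ 0 then s ++ [nun.1] else s) s
      = s ++ pvMerge ts := by
  induction ts using pvBuild.induct with
  | case1 => intro _ s; simp [pvBuild, pvMerge]
  | case2 x =>
    intro hnz s
    have hx : x ≠ 0 := hnz x (by simp)
    simp [pvBuild, pvMerge, hx]
  | case3 x r ih =>
    intro hnz s
    have hx : x ≠ 0 := hnz x (by simp)
    have h2 : x * 2 ≠ 0 := by omega
    simp only [pvBuild, pvMerge, if_true, List.foldl_cons]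
    rw [if_pos h2, ih (fun z hz => hnz z (by simp [hz]))]
    simp
  | case4 x y r hne ih =>
    intro hnz s
    have hx : x ≠ 0 := hnz x (by simp)
    simp only [pvBuild, pvMerge, if_neg hne, List.foldl_cons]
    rw [if_pos hx, ih (fun z hz => hnz z (by simp [hz]))]
    simp

-- A's padding loop is an append of replicated zeros
theorem foldl_pad (n : Int) (s : List Int) :
    (PySem.List.pyRange 0 n 1).foldl (fun s _ => s ++ [(0 : Int)]) s
      = s ++ List.replicate n.toNat 0 := by
  have gen : ∀ (l : List Int) (s : List Int),
      l.foldl (fun s _ => s ++ [(0 : Int)]) s = s ++ List.replicate l.length 0 := by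
    intro l
    induction l with
    | nil => simp
    | cons a r ih =>
      intro s
      rw [List.foldl_cons, ih]
      simp [List.replicate_succ, List.append_assoc]
  rw [gen, PySem.List.length_pyRange_one]
  simp

-- ===== VERDICT (by name: the statement is the Claim_ definition above) =====
theorem line_shift_spec : Claim_equal_line_shift := by
  intro line _
  unfold Spec_line_shift line_shift line_shift_alt
  simp only
  rw [foldl_pvStep_filter]
  have hnz : ∀ x ∈ line.filter (fun x => x ≠ 0), x ≠ 0 := by
    intro x hx
    simpa using (List.of_mem_filter hx)
  rw [foldl_pvBuild _ [] hnz (by intro t _ p hp; simp at hp)]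
  rw [List.nil_append, foldl_stack _ hnz, List.nil_append, foldl_pad]
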